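-- pv_equiv track=rewrite | github.com/Victor-Dixon/Dream.os | agent_workspaces/Agent-3/quality_first_communication_protocol.py | _detect_repetitive_content
-- ===== SOURCE A (Python) =====
-- def _detect_repetitive_content(content: str) -> int:
--     """Detect repetitive content patterns"""
--     words = content.lower().split()
--     if len(words) < 5:
--         return 0
--
--     # Count repeated phrases
--     phrase_count = {}
--     for i in range(len(words) - 2):
--         phrase = " ".join(words[i:i+3])
--         phrase_count[phrase] = phrase_count.get(phrase, 0) + 1
--
--     return sum(1 for count in phrase_count.values() if count > 1)
-- ===== SOURCE B (Python) =====
-- def _detect_repetitive_content(content: str) -> int: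
--     """Detect repetitive content patterns (sort-and-scan grouping)."""
--     words = content.lower().split()
--     if len(words) < 5:
--         return 0
--
--     phrases = sorted(" ".join(words[i:i+3]) for i in range(len(words) - 2))
--
--     result = 0
--     run = 0
--     prev = None
--     for p in phrases:
--         if p == prev:
--             run += 1
--             if run == 2:
--                 result += 1
--         else:
--             prev = p
--             run = 1
--     return result
-- ===== Notes on version B (the rewrite author's own statement) =====
-- stated objective: alternative
-- what changed: Replaces the hash-dict frequency table with sort-based grouping: B builds the list of 3-word phrases, sorts it, and counts in one adjacency scan each run of identical phrases whose length reaches 2.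
import Mathlib
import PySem

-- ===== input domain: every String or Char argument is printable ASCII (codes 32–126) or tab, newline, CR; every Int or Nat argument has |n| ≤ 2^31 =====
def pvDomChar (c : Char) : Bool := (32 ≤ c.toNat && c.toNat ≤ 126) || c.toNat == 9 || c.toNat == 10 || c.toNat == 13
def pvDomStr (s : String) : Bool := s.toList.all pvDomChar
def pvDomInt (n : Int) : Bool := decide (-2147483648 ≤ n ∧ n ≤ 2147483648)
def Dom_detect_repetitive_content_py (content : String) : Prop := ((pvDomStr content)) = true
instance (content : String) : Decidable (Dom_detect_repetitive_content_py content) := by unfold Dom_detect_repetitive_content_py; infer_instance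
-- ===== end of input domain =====

-- B replaces A's hash-dict phrase counter with sort-based grouping: sort the 3-word-phrase list, then one adjacency scan counts each run of identical phrases whose length reaches 2 (an alternative algorithm of similar cost; return value proved equal).


-- ===== PORT A =====
def detect_repetitive_content_py (content : String) : Int :=
  let words := PySem.Str.split₀ (PySem.Str.lower content)
  if (words.length : Int) < 5 then 0
  else
    let phrase_count :=
      (PySem.List.pyRange 0 ((words.length : Int) - 2)).foldl
        (fun (d : PySem.Dict String Int) i =>
          let phrase := PySem.Str.join " " (PySem.List.slice words (some i) (some (i + 3)))
          d.insert phrase (d.getD phrase 0 + 1))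
        PySem.Dict.empty
    (phrase_count.values.map (fun count => if 1 < count then (1 : Int) else 0)).sum

-- ===== PORT B =====
def detect_repetitive_content_py_alt (content : String) : Int :=
  let words := PySem.Str.split₀ (PySem.Str.lower content)
  if (words.length : Int) < 5 then 0
  else
    let phrases := PySem.List.sorted
      ((PySem.List.pyRange 0 ((words.length : Int) - 2)).map
        (fun i => PySem.Str.join " " (PySem.List.slice words (some i) (some (i + 3)))))
      (fun p => p)
    let st := phrases.foldl
      (fun (st : Option String × Int × Int) p =>
        if some p == st.1 then
          (st.1, st.2.1 + 1, if st.2.1 + 1 == 2 then st.2.2 + 1 else st.2.2)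
        else
          (some p, 1, st.2.2))
      ((none : Option String), (0 : Int), (0 : Int))
    st.2.2

-- ===== PRECONDITION & SPEC =====
def Spec_detect_repetitive_content_py (content : String) (out : Int) : Prop := out = detect_repetitive_content_py_alt content
instance (content : String) (out : Int) : Decidable (Spec_detect_repetitive_content_py content out) := by unfold Spec_detect_repetitive_content_py; infer_instance

-- ===== CLAIM (what is proved, stated in full; the proofs are below) =====
def Claim_equal_detect_repetitive_content_py : Prop := ∀ (content : String), Dom_detect_repetitive_content_py content → Spec_detect_repetitive_content_py content (detect_repetitive_content_py content)

-- ===== LEMMAS AND PROOFS =====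

def pvStep : (Option String × Int × Int) → String → Option String × Int × Int
  | (prev, run, res), p =>
    if some p == prev then
      (prev, run + 1, if run + 1 == 2 then res + 1 else res)
    else
      (some p, 1, res)

lemma pvStep_res_add (t : List String) (prev : Option String) (run res : Int) :
    (t.foldl pvStep (prev, run, res)).2.2 = res + (t.foldl pvStep (prev, run, 0)).2.2 := by
  induction t generalizing prev run res with
  | nil => simp
  | cons b t ih =>
    simp only [List.foldl_cons, pvStep]
    by_cases h : (some b == prev) = true
    · by_cases h2 : (run + 1 == 2) = true
      · simp only [h, if_true, h2]
        rw [ih]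
        try conv_rhs => rw [ih]
        try omega
      · simp only [h, if_true, if_neg h2]
        rw [ih]
    · simp only [if_neg h]
      rw [ih]

lemma pvStep_replicate (m : Nat) (a : String) (run res : Int) (hrun : 1 ≤ run) :
    (List.replicate m a).foldl pvStep (some a, run, res)
      = (some a, run + m, res + if run < 2 ∧ 2 ≤ run + m then 1 else 0) := by
  induction m generalizing run res with
  | zero =>
    have h : ¬ (run < 2 ∧ 2 ≤ run) := by omega
    simp only [List.replicate_zero, List.foldl_nil, Nat.cast_zero, add_zero, if_neg h]
  | succ m ih =>
    rw [List.replicate_succ, List.foldl_cons]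
    simp only [pvStep, beq_self_eq_true, if_true]
    rw [ih (run + 1) _ (by omega)]
    simp only [Prod.mk.injEq, true_and]
    refine ⟨by push_cast; ring, ?_⟩
    split_ifs <;> (try simp only [beq_iff_eq] at *) <;> omega

lemma pvStep_reset (r : List String) (a : String) (run res : Int)
    (hr : r = [] ∨ ∃ b r', r = b :: r' ∧ b ≠ a) :
    (r.foldl pvStep (some a, run, res)).2.2 = res + (r.foldl pvStep (none, 0, 0)).2.2 := by
  rcases hr with h | ⟨b, r', rfl, hba⟩
  · subst h; simp
  · have h1 : (some b == some a) = false := by simp [hba]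
    have h2 : (some b == (none : Option String)) = false := by simp
    simp only [List.foldl_cons, pvStep, h1, h2, Bool.false_eq_true, if_false]
    rw [pvStep_res_add]

lemma pvDropWhileHeadFalse (p : String → Bool) (t : List String) (b : String) (r' : List String)
    (h : t.dropWhile p = b :: r') : p b = false := by
  induction t with
  | nil => simp at h
  | cons c t ih =>
    rw [List.dropWhile_cons] at h
    by_cases hc : p c = true
    · exact ih (by simpa [hc] using h)
    · have hcb : c = b := by
        simp only [hc] at h
        exact (List.cons.injEq _ _ _ _ ▸ h).1
      rw [← hcb]
      exact Bool.eq_false_iff.mpr hc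

theorem pvScan_sorted (S : List String) (h : S.Pairwise (· ≤ ·)) :
    (S.foldl pvStep (none, 0, 0)).2.2
      = ((PySem.Set.ofList S).countP (fun k => decide (2 ≤ S.count k)) : Int) := by
  match S with
  | [] => simp [PySem.Set.ofList]
  | a :: t =>
    set g := t.takeWhile (fun x => x == a) with hg
    set r := t.dropWhile (fun x => x == a) with hdw
    set m := g.length with hm
    have htgr : t = g ++ r := (List.takeWhile_append_dropWhile).symm
    have hrep : g = List.replicate m a := by
      apply List.eq_replicate_of_mem
      intro b hb
      have := List.mem_takeWhile_imp hb
      simpa using this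
    have hrpair : r.Pairwise (· ≤ ·) := h.sublist ((List.dropWhile_sublist _).cons _)
    have hrgt : ∀ x ∈ r, a < x := by
      have ha : ∀ y ∈ t, a ≤ y := (List.pairwise_cons.mp h).1
      cases hr : r with
      | nil =>
        intro x hx
        simp at hx
      | cons b r' =>
        have hb_mem : b ∈ t := by
          rw [htgr, hr]
          simp
        have hab : a ≤ b := ha b hb_mem
        have hbne : (b == a) = false := pvDropWhileHeadFalse _ t b r' (hdw ▸ hr)
        have hba : a < b := lt_of_le_of_ne hab (by
          intro e
          rw [e] at hbne
          simp at hbne)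
        intro x hx
        rcases List.mem_cons.mp hx with rfl | hx
        · exact hba
        · have hp : (b :: r').Pairwise (· ≤ ·) := hr ▸ hrpair
          exact lt_of_lt_of_le hba ((List.pairwise_cons.mp hp).1 x hx)
    have hra : a ∉ r := fun hx => (ne_of_gt (hrgt a hx)) rfl
    have hrlen : r.length < (a :: t).length := by
      have h1 := List.length_dropWhile_le (fun x => x == a) t
      rw [← hdw] at h1
      simp only [List.length_cons]
      omega
    have IH := pvScan_sorted r hrpair
    have hstep1 : pvStep (none, 0, 0) a = (some a, 1, 0) := by
      simp [pvStep]
    have hreset : r = [] ∨ ∃ b r', r = b :: r' ∧ b ≠ a := by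
      cases hr : r with
      | nil => exact Or.inl rfl
      | cons b r' =>
        refine Or.inr ⟨b, r', rfl, ?_⟩
        have : a < b := hrgt b (by rw [hr]; exact List.mem_cons_self)
        exact ne_of_gt this
    have hcount_a : (a :: t).count a = 1 + m := by
      rw [htgr, hrep]
      simp only [List.count_cons_self, List.count_append, List.count_replicate,
        beq_self_eq_true, if_true, List.count_eq_zero.mpr hra]
      omega
    have hcount_ne : ∀ x, x ≠ a → (a :: t).count x = r.count x := by
      intro x hx
      have hax : ¬ a = x := fun e => hx e.symm
      rw [htgr, hrep]
      simp [List.count_append, List.count_replicate, hax]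
    have hperm : (PySem.Set.ofList (a :: t)).Perm (a :: PySem.Set.ofList r) := by
      rw [List.perm_ext_iff_of_nodup (PySem.Set.nodup_ofList _)
        (by simp [List.nodup_cons, PySem.Set.nodup_ofList, PySem.Set.mem_ofList, hra])]
      intro x
      rw [PySem.Set.mem_ofList, List.mem_cons, List.mem_cons, PySem.Set.mem_ofList]
      constructor
      · rintro (rfl | hx)
        · exact Or.inl rfl
        · rw [htgr, List.mem_append] at hx
          rcases hx with hx | hx
          · rw [hrep] at hx
            exact Or.inl (List.eq_of_mem_replicate hx)
          · exact Or.inr hx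
      · rintro (rfl | hx)
        · exact Or.inl rfl
        · refine Or.inr ?_
          rw [htgr, List.mem_append]
          exact Or.inr hx
    have hq : ∀ x ∈ PySem.Set.ofList r,
        (decide (2 ≤ (a :: t).count x) = true ↔ decide (2 ≤ r.count x) = true) := by
      intro x hx
      have hxr : x ∈ r := (PySem.Set.mem_ofList _ _).mp hx
      have hxa : x ≠ a := ne_of_gt (hrgt x hxr)
      rw [hcount_ne x hxa]
    calc ((a :: t).foldl pvStep (none, 0, 0)).2.2
        = ((g ++ r).foldl pvStep (some a, 1, 0)).2.2 := by
          rw [List.foldl_cons, hstep1]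
          conv_lhs => rw [htgr]
      _ = (r.foldl pvStep (some a, 1 + (m:Int), 0 + if (1:Int) < 2 ∧ 2 ≤ 1 + (m:Int) then 1 else 0)).2.2 := by
          rw [List.foldl_append, hrep, pvStep_replicate m a 1 0 (by omega)]
      _ = (0 + if (1:Int) < 2 ∧ 2 ≤ 1 + (m:Int) then 1 else 0) + (r.foldl pvStep (none, 0, 0)).2.2 := by
          rw [pvStep_reset _ _ _ _ hreset]
      _ = (if (1:Int) < 2 ∧ 2 ≤ 1 + (m:Int) then 1 else 0)
            + ((PySem.Set.ofList r).countP (fun k => decide (2 ≤ r.count k)) : Int) := by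
          rw [IH]; ring
      _ = ((PySem.Set.ofList (a :: t)).countP (fun k => decide (2 ≤ (a :: t).count k)) : Int) := by
          rw [hperm.countP_eq, List.countP_cons, List.countP_congr hq]
          have hca : (2 ≤ (a :: t).count a) ↔ 1 ≤ m := by rw [hcount_a]; omega
          by_cases h1 : 1 ≤ m
          · have hc : ((1:Int) < 2 ∧ 2 ≤ 1 + (m:Int)) := by
              constructor
              · omega
              · omega
            simp only [if_pos hc, decide_eq_true_eq, hca, if_pos h1]
            push_cast
            ring
          · have hc : ¬ ((1:Int) < 2 ∧ 2 ≤ 1 + (m:Int)) := by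
              rintro ⟨_, hu⟩
              omega
            simp only [if_neg hc, decide_eq_true_eq, hca, if_neg h1]
            push_cast
            ring
termination_by S.length
decreasing_by simpa using hrlen

-- the two sides agree on the else-branch: the dict count equals the sorted-scan count
theorem pvBranches_eq (words : List String) :
    (((PySem.List.pyRange 0 ((words.length : Int) - 2)).foldl
        (fun (d : PySem.Dict String Int) i =>
          let phrase := PySem.Str.join " " (PySem.List.slice words (some i) (some (i + 3)))
          d.insert phrase (d.getD phrase 0 + 1))
        PySem.Dict.empty).values.map (fun count => if 1 < count then (1 : Int) else 0)).sum
      = ((PySem.List.sorted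
            ((PySem.List.pyRange 0 ((words.length : Int) - 2)).map
              (fun i => PySem.Str.join " " (PySem.List.slice words (some i) (some (i + 3)))))
            (fun p => p)).foldl
          (fun (st : Option String × Int × Int) p =>
            if some p == st.1 then
              (st.1, st.2.1 + 1, if st.2.1 + 1 == 2 then st.2.2 + 1 else st.2.2)
            else
              (some p, 1, st.2.2))
          ((none : Option String), (0 : Int), (0 : Int))).2.2 := by
  set f : Int → String :=
    fun i => PySem.Str.join " " (PySem.List.slice words (some i) (some (i + 3))) with hf
  set P : List String := (PySem.List.pyRange 0 ((words.length : Int) - 2)).map f with hP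
  set S : List String := PySem.List.sorted P (fun p => p) with hS
  -- A side
  have e1 : (PySem.List.pyRange 0 ((words.length : Int) - 2)).foldl
        (fun (d : PySem.Dict String Int) i => d.insert (f i) (d.getD (f i) 0 + 1))
        PySem.Dict.empty
      = P.foldl (fun (d : PySem.Dict String Int) p => d.insert p (d.getD p 0 + 1))
        PySem.Dict.empty := by
    rw [hP, List.foldl_map]
  have e2 : P.foldl (fun (d : PySem.Dict String Int) p => d.insert p (d.getD p 0 + 1))
        PySem.Dict.empty = PySem.Dict.counter P := by
    rw [PySem.Dict.counter_eq_foldl]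
    rfl
  have e3 : (PySem.Dict.counter P).values = (PySem.Set.ofList P).map (fun k => ((P.count k : Nat) : Int)) := by
    show ((PySem.Dict.counter P).items.map Prod.snd) = _
    rw [PySem.Dict.items_counter, List.map_map]
    rfl
  have hfun : (fun c : Int => if 1 < c then (1 : Int) else 0) ∘ (fun k => ((P.count k : Nat) : Int))
      = (fun k => if (fun k => decide (2 ≤ P.count k)) k = true then (1 : Int) else 0) := by
    funext k
    by_cases hk : 2 ≤ P.count k
    · have h1 : (1 : Int) < ((P.count k : Nat) : Int) := by exact_mod_cast hk
      simp only [Function.comp_apply, if_pos h1, if_pos (decide_eq_true hk)]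
    · have h1 : ¬ (1 : Int) < ((P.count k : Nat) : Int) := by
        intro hc
        exact hk (by exact_mod_cast hc)
      simp only [Function.comp_apply, if_neg h1, decide_eq_true_eq, if_neg hk]
  have eA : (((PySem.List.pyRange 0 ((words.length : Int) - 2)).foldl
        (fun (d : PySem.Dict String Int) i => d.insert (f i) (d.getD (f i) 0 + 1))
        PySem.Dict.empty).values.map (fun count => if 1 < count then (1 : Int) else 0)).sum
      = ((PySem.Set.ofList P).countP (fun k => decide (2 ≤ P.count k)) : Int) := by
    rw [e1, e2, e3, List.map_map, hfun, PySem.List.sum_map_ite_one_zero]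
  -- B side
  have hlam : (fun (st : Option String × Int × Int) p =>
        if some p == st.1 then
          (st.1, st.2.1 + 1, if st.2.1 + 1 == 2 then st.2.2 + 1 else st.2.2)
        else
          (some p, 1, st.2.2)) = pvStep := by
    funext st p
    rcases st with ⟨pr, run, res⟩
    rfl
  have hsort : S.Pairwise (· ≤ ·) := by
    have := PySem.List.sorted_pairwise P (fun p => p)
    simpa [hS] using this
  have hperm : S.Perm P := PySem.List.sorted_perm P (fun p => p) false
  have hopl : (PySem.Set.ofList S).Perm (PySem.Set.ofList P) := by
    rw [List.perm_ext_iff_of_nodup (PySem.Set.nodup_ofList _) (PySem.Set.nodup_ofList _)]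
    intro x
    rw [PySem.Set.mem_ofList, PySem.Set.mem_ofList]
    exact hperm.mem_iff
  have hfun2 : (fun k => decide (2 ≤ S.count k)) = (fun k => decide (2 ≤ P.count k)) := by
    funext k
    rw [hperm.count_eq]
  have eB : ((S.foldl pvStep ((none : Option String), (0 : Int), (0 : Int))).2.2)
      = ((PySem.Set.ofList P).countP (fun k => decide (2 ≤ P.count k)) : Int) := by
    rw [pvScan_sorted S hsort, hfun2, hopl.countP_eq]
  rw [hlam]
  exact eA.trans eB.symm

-- ===== VERDICT (by name: the statement is the Claim_ definition above) =====
theorem detect_repetitive_content_py_spec : Claim_equal_detect_repetitive_content_py := by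
  intro content _
  unfold Spec_detect_repetitive_content_py
  show detect_repetitive_content_py content = detect_repetitive_content_py_alt content
  unfold detect_repetitive_content_py detect_repetitive_content_py_alt
  by_cases h5 : ((PySem.Str.split₀ (PySem.Str.lower content)).length : Int) < 5
  · simp only [if_pos h5]
  · simp only [if_neg h5]
    exact pvBranches_eq (PySem.Str.split₀ (PySem.Str.lower content))
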